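-- pv_equiv track=rewrite | github.com/AslanZ-5/some-code | codewars/codewars.py | solve
-- ===== SOURCE A (Python) =====
-- def solve(st):
--     st = sorted(st)
--     c = []
--     for i in range(1, len(st)):
--         if ord(st[i]) == ord(st[i - 1]):
--             c.append(False)
--         elif ord(st[i]) == ord(st[i - 1]) + 1:
--             c.append(True)
--         else:
--             c.append(False)
--     return all(c)
-- ===== SOURCE B (Python) =====
-- def solve(st):
--     if not st:
--         return True
--     codes = set(map(ord, st))
--     return len(codes) == len(st) and max(codes) - min(codes) == len(st) - 1
-- ===== Notes on version B (the rewrite author's own statement) =====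
-- stated objective: faster
-- what changed: replaced sort + adjacent-pair scan with a single pass computing the set of character codes plus min/max: consecutive iff all codes distinct and max-min == len-1
import Mathlib
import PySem

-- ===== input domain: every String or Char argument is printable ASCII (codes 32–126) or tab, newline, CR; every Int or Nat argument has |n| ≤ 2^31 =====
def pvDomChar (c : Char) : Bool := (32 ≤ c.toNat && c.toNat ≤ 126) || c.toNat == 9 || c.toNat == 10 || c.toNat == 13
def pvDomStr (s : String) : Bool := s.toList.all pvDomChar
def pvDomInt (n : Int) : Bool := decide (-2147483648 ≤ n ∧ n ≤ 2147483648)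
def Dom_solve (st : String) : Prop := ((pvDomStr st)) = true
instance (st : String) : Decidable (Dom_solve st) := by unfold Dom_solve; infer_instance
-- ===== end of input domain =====

-- B replaces A's sort + adjacent-pair scan by a set of character codes plus min/max.

-- ===== PORT A =====
def solve (st : String) : Bool :=
  let s := PySem.List.sorted st.toList (fun ch => ch) false
  let c := (PySem.List.pyRange 1 (PySem.List.len s) 1).foldl
    (fun acc i =>
      if (PySem.List.pyGetD s i 'a').toNat = (PySem.List.pyGetD s (i - 1) 'a').toNat then
        acc ++ [false]
      else if (PySem.List.pyGetD s i 'a').toNat = (PySem.List.pyGetD s (i - 1) 'a').toNat + 1 then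
        acc ++ [true]
      else
        acc ++ [false]) []
  c.all id

-- ===== PORT B =====
def solve_alt (st : String) : Bool :=
  if st.toList = [] then true
  else
    let codes : PySem.Set Int := PySem.Set.ofList (st.toList.map (fun ch => (ch.toNat : Int)))
    (PySem.List.len codes == PySem.List.len st.toList) &&
      ((PySem.List.max? codes (fun v => v)).getD 0 - (PySem.List.min? codes (fun v => v)).getD 0
        == PySem.List.len st.toList - 1)

-- ===== PRECONDITION & SPEC =====
def Spec_solve (st : String) (out : Bool) : Prop := out = solve_alt st
instance (st : String) (out : Bool) : Decidable (Spec_solve st out) := by unfold Spec_solve; infer_instance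

-- ===== CLAIM =====
def Claim_equal_solve : Prop := ∀ (st : String), Dom_solve st → Spec_solve st (solve st)

-- ===== LEMMAS AND PROOFS =====

def chainb : List Nat → Bool
  | [] => true
  | [_] => true
  | a :: b :: t => (b == a + 1) && chainb (b :: t)

theorem chainb_iff_getElem (cs : List Nat) :
    chainb cs = true ↔ ∀ (k : Nat) (h : k + 1 < cs.length), cs[k + 1] = cs[k] + 1 := by
  induction cs with
  | nil => simp [chainb]
  | cons a t ih =>
    cases t with
    | nil => simp [chainb]
    | cons b u =>
      rw [chainb]
      simp only [Bool.and_eq_true, beq_iff_eq, ih]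
      constructor
      · rintro ⟨hb, hrest⟩ k hk
        cases k with
        | zero => simpa using hb
        | succ k => simpa using hrest k (by simpa using hk)
      · intro h
        refine ⟨by simpa using h 0 (by simp), fun k hk => ?_⟩
        simpa using h (k + 1) (by simpa using hk)

theorem getLast_ge_of_pairwise_lt (y : Nat) (u : List Nat)
    (h : (y :: u).Pairwise (· < ·)) :
    y + u.length ≤ (y :: u).getLast (by simp) := by
  induction u generalizing y with
  | nil => simp
  | cons z v ih =>
    obtain ⟨h1, h2⟩ := List.pairwise_cons.1 h
    have hz := ih z h2
    rw [List.getLast_cons (by simp)]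
    have : y < z := h1 z (by simp)
    simpa using by omega

theorem chainb_iff_nodup_last (x : Nat) (t : List Nat)
    (hs : (x :: t).Pairwise (· ≤ ·)) :
    chainb (x :: t) = true ↔
      ((x :: t).Nodup ∧ (x :: t).getLast (by simp) = x + t.length) := by
  induction t generalizing x with
  | nil => simp [chainb]
  | cons y u ih =>
    obtain ⟨hx, hs'⟩ := List.pairwise_cons.1 hs
    have hxy : x ≤ y := hx y (by simp)
    have hyu : ∀ z ∈ u, y ≤ z := fun z hz => (List.pairwise_cons.1 hs').1 z hz
    rw [chainb, List.getLast_cons (by simp)]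
    simp only [Bool.and_eq_true, beq_iff_eq, ih y hs', List.nodup_cons, List.length_cons]
    constructor
    · rintro ⟨hb, hnd, hlast⟩
      subst hb
      refine ⟨⟨?_, hnd⟩, by omega⟩
      intro hmem
      rcases List.mem_cons.1 hmem with h | h
      · omega
      · exact absurd (hyu x h) (by omega)
    · rintro ⟨⟨hnotmem, hnd⟩, hlast⟩
      have hnodup : (y :: u).Nodup := List.nodup_cons.2 ⟨hnd.1, hnd.2⟩
      have hlt : (y :: u).Pairwise (· < ·) :=
        (hs'.and hnodup).imp fun ⟨h1, h2⟩ => lt_of_le_of_ne h1 h2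
      have hge := getLast_ge_of_pairwise_lt y u hlt
      have hx1 : x ≠ y := fun h => hnotmem (by simp [h])
      have hy : y = x + 1 := by omega
      exact ⟨hy, hnd, by omega⟩

theorem solve_eq_chainb (st : String) :
    solve st = chainb ((PySem.List.sorted st.toList (fun ch => ch) false).map Char.toNat) := by
  unfold solve
  dsimp only
  set s := PySem.List.sorted st.toList (fun ch => ch) false with hsdef
  have hfun : (fun (acc : List Bool) (i : Int) =>
      if (PySem.List.pyGetD s i 'a').toNat = (PySem.List.pyGetD s (i - 1) 'a').toNat then
        acc ++ [false]
      else if (PySem.List.pyGetD s i 'a').toNat = (PySem.List.pyGetD s (i - 1) 'a').toNat + 1 then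
        acc ++ [true]
      else
        acc ++ [false]) =
      (fun acc i => acc ++ [if (PySem.List.pyGetD s i 'a').toNat = (PySem.List.pyGetD s (i - 1) 'a').toNat then
        false
      else if (PySem.List.pyGetD s i 'a').toNat = (PySem.List.pyGetD s (i - 1) 'a').toNat + 1 then
        true
      else false]) := by
    funext acc i; split_ifs <;> rfl
  rw [hfun, PySem.List.foldl_append_singleton_eq_map, List.nil_append, List.all_map]
  rw [Bool.eq_iff_iff, List.all_eq_true, chainb_iff_getElem]
  simp only [Function.comp, List.length_map, List.getElem_map]
  constructor
  · intro h k hk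
    have hh := h ((k : Int) + 1) (by rw [PySem.List.mem_pyRange_one, PySem.List.len_eq]; omega)
    rw [show ((k : Int) + 1) = (((k + 1 : Nat)) : Int) by push_cast; ring] at hh
    rw [show (((k + 1 : Nat)) : Int) - 1 = ((k : Nat) : Int) by push_cast; ring] at hh
    rw [PySem.List.pyGetD_natCast, PySem.List.pyGetD_natCast] at hh
    rw [List.getD_eq_getElem _ _ (by omega), List.getD_eq_getElem _ _ (by omega)] at hh
    simp only [id_eq] at hh
    split_ifs at hh with h1 h2
    · exact h2
  · intro h i hi
    rw [PySem.List.mem_pyRange_one, PySem.List.len_eq] at hi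
    obtain ⟨k, hk⟩ : ∃ k : Nat, i = ((k + 1 : Nat) : Int) := ⟨i.toNat - 1, by omega⟩
    subst hk
    rw [show (((k + 1 : Nat)) : Int) - 1 = ((k : Nat) : Int) by push_cast; ring]
    rw [PySem.List.pyGetD_natCast, PySem.List.pyGetD_natCast]
    have hk1 : k + 1 < s.length := by omega
    rw [List.getD_eq_getElem _ _ (by omega), List.getD_eq_getElem _ _ (by omega)]
    have hh := h k (by omega)
    simp only [id_eq]
    split_ifs with h1
    · omega
    · rfl

theorem toNat_injective : Function.Injective Char.toNat :=
  fun _ _ h => Char.ext (UInt32.toNat_inj.1 h)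

theorem mem_le_getLast (cs : List Nat) (h : cs.Pairwise (· ≤ ·)) (hne : cs ≠ []) :
    ∀ a ∈ cs, a ≤ cs.getLast hne := by
  induction cs with
  | nil => simp
  | cons y u ih =>
    obtain ⟨h1, h2⟩ := List.pairwise_cons.1 h
    intro a ha
    cases u with
    | nil => simp at ha; simp [ha]
    | cons z v =>
      rw [List.getLast_cons (by simp)]
      rcases List.mem_cons.1 ha with rfl | ha'
      · exact le_trans (h1 _ (List.getLast_mem _)) (le_refl _)
      · exact ih h2 (by simp) a ha'

theorem head_le_mem (x : Nat) (t : List Nat) (h : (x :: t).Pairwise (· ≤ ·)) :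
    ∀ a ∈ x :: t, x ≤ a := by
  intro a ha
  rcases List.mem_cons.1 ha with rfl | ha'
  · exact le_refl a
  · exact (List.pairwise_cons.1 h).1 a ha'

theorem getLast_eq_of_eq {α : Type} {l1 l2 : List α} (h : l1 = l2) (h1 : l1 ≠ []) :
    l1.getLast h1 = l2.getLast (h ▸ h1) := by subst h; rfl

theorem setOfList_length_eq_iff (xs : List Int) :
    (PySem.Set.ofList xs).length = xs.length ↔ xs.Nodup := by
  have hperm : (PySem.Set.ofList xs).Perm xs.dedup :=
    (List.perm_ext_iff_of_nodup (PySem.Set.nodup_ofList xs) (List.nodup_dedup xs)).2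
      (fun a => by rw [PySem.Set.mem_ofList, List.mem_dedup])
  rw [hperm.length_eq]
  constructor
  · intro h
    exact List.dedup_eq_self.1 ((List.dedup_sublist xs).eq_of_length h)
  · intro h
    rw [List.dedup_eq_self.2 h]

-- ===== VERDICT =====
theorem solve_spec : Claim_equal_solve := by
  intro st _
  unfold Spec_solve
  by_cases hl : st.toList = []
  · unfold solve solve_alt
    rw [hl]
    rfl
  · rw [solve_eq_chainb st]
    unfold solve_alt
    rw [if_neg hl]
    dsimp only
    set l := st.toList with hldef
    set f : Char → Int := fun ch => (ch.toNat : Int) with hfdef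
    set s := PySem.List.sorted l (fun ch => ch) false with hsdef
    set codes := PySem.Set.ofList (l.map f) with hcdef
    have hsne : s ≠ [] := by
      rw [hsdef]; simpa [PySem.List.sorted_eq_nil_iff] using hl
    have hperm : s.Perm l := PySem.List.sorted_perm l _ false
    have hpair : s.Pairwise (· ≤ ·) := PySem.List.sorted_pairwise l (fun ch => ch)
    have hpairN : (s.map Char.toNat).Pairwise (· ≤ ·) :=
      List.Pairwise.map _ (fun a b hab => UInt32.le_iff_toNat_le.1 (Char.le_def.1 hab)) hpair
    obtain ⟨x, t, hxt⟩ := List.exists_cons_of_ne_nil hsne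
    -- max? and min? of the nonempty set of codes
    have hcne : codes ≠ [] := by
      intro h
      have : f x ∈ codes := by
        rw [hcdef, PySem.Set.mem_ofList]
        exact List.mem_map_of_mem (hperm.mem_iff.1 (by simp [hxt]))
      simp [h] at this
    obtain ⟨M, hM⟩ : ∃ M, PySem.List.max? codes (fun v => v) = some M := by
      cases h : PySem.List.max? codes (fun v => v) with
      | none => exact absurd ((PySem.List.max?_eq_none_iff _ _).1 h) hcne
      | some M => exact ⟨M, rfl⟩
    obtain ⟨m, hm⟩ : ∃ m, PySem.List.min? codes (fun v => v) = some m := by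
      cases h : PySem.List.min? codes (fun v => v) with
      | none => exact absurd ((PySem.List.min?_eq_none_iff _ _).1 h) hcne
      | some m => exact ⟨m, rfl⟩
    -- values in codes are exactly the f-images of members of s
    have hmem : ∀ y, y ∈ codes ↔ ∃ ch ∈ s, f ch = y := by
      intro y
      rw [hcdef, PySem.Set.mem_ofList, List.mem_map]
      constructor
      · rintro ⟨ch, hch, rfl⟩; exact ⟨ch, hperm.mem_iff.2 hch, rfl⟩
      · rintro ⟨ch, hch, rfl⟩; exact ⟨ch, hperm.mem_iff.1 hch, rfl⟩
    have hlastmem : s.getLast hsne ∈ s := List.getLast_mem hsne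
    have hboundN : ∀ a ∈ s.map Char.toNat, a ≤ (s.map Char.toNat).getLast (by simp [hsne]) :=
      mem_le_getLast _ hpairN (by simp [hsne])
    have hlastN : (s.map Char.toNat).getLast (by simp [hsne]) = (s.getLast hsne).toNat :=
      List.getLast_map (by simp [hsne])
    have hbound : ∀ ch ∈ s, ch.toNat ≤ (s.getLast hsne).toNat := by
      intro ch hch
      have := hboundN ch.toNat (List.mem_map_of_mem hch)
      rwa [hlastN] at this
    have hpairN' : (x.toNat :: t.map Char.toNat).Pairwise (· ≤ ·) := by
      rw [← List.map_cons, ← hxt]; exact hpairN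
    have hheadN : ∀ a ∈ s.map Char.toNat, x.toNat ≤ a := by
      rw [hxt, List.map_cons]
      exact head_le_mem _ _ hpairN'
    have hhead : ∀ ch ∈ s, x.toNat ≤ ch.toNat :=
      fun ch hch => hheadN ch.toNat (List.mem_map_of_mem hch)
    -- M is the code of the last (largest) char, m that of the first (smallest)
    have hMval : M = f (s.getLast hsne) := by
      refine le_antisymm ?_ ?_
      · obtain ⟨ch, hch, rfl⟩ := (hmem M).1 (PySem.List.max?_mem hM)
        have := hbound ch hch
        simp only [hfdef]; exact_mod_cast this
      · exact PySem.List.max?_isMax hM _ ((hmem _).2 ⟨_, hlastmem, rfl⟩)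
    have hmval : m = f x := by
      refine le_antisymm ?_ ?_
      · exact PySem.List.min?_isMin hm _ ((hmem _).2 ⟨x, by simp [hxt], rfl⟩)
      · obtain ⟨ch, hch, rfl⟩ := (hmem m).1 (PySem.List.min?_mem hm)
        have := hhead ch hch
        simp only [hfdef]; exact_mod_cast this
    -- nodup chain
    have hnodup_iff : codes.length = l.length ↔ (s.map Char.toNat).Nodup := by
      rw [hcdef]
      rw [show l.length = (l.map f).length by rw [List.length_map]]
      rw [setOfList_length_eq_iff]
      rw [List.nodup_map_iff (fun a b h => toNat_injective (Int.natCast_inj.1 (by simpa [hfdef] using h)))]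
      rw [← hperm.nodup_iff]
      rw [List.nodup_map_iff toNat_injective]
    -- assemble
    rw [hM, hm, hxt]
    rw [show (x :: t).map Char.toNat = x.toNat :: t.map Char.toNat from rfl]
    rw [Bool.eq_iff_iff, Bool.and_eq_true]
    rw [chainb_iff_nodup_last x.toNat (t.map Char.toNat) hpairN']
    simp only [Option.getD_some, beq_iff_eq, PySem.List.len_eq]
    have hlen : l.length = t.length + 1 := by rw [← hperm.length_eq, hxt]; simp
    have hlast' : (x.toNat :: t.map Char.toNat).getLast (by simp) = (s.getLast hsne).toNat := by
      have heq : x.toNat :: t.map Char.toNat = s.map Char.toNat := by rw [hxt]; rfl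
      exact (getLast_eq_of_eq heq (by simp)).trans hlastN
    constructor
    · rintro ⟨hnd, hlast⟩
      rw [hlast'] at hlast
      constructor
      · rw [show (codes.length : Int) = (l.length : Int) ↔ codes.length = l.length from Int.natCast_inj]
        rw [hnodup_iff, hxt]; exact hnd
      · simp only [hMval, hmval, hfdef, hlen]
        push_cast
        simp only [List.length_map] at hlast
        omega
    · rintro ⟨hlenEq, harith⟩
      have hnd : ((x :: t).map Char.toNat).Nodup := by
        rw [← hxt, ← hnodup_iff]; exact_mod_cast hlenEq
      refine ⟨hnd, ?_⟩
      rw [hlast']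
      simp only [hMval, hmval, hfdef, hlen] at harith
      push_cast at harith
      simp only [List.length_map]
      omega
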